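-- pv_equiv track=rewrite | github.com/Qugma/maturkazinfy | matura2.4.py | czy_mniejszy
-- ===== SOURCE A (Python) =====
-- def czy_mniejszy(n, s, k1, k2):
--     i = k1
--     j = k2
--
--     while i < n and j < n:
--
--         if s[i] == s[j]:
--            i +=1
--            j +=1
--
--         else:
--
--             if s[i] < s[j]:
--                 return True
--             else:
--                 return False
--     if j <= n:
--         return True
--     else:
--         return False
-- ===== SOURCE B (Python) =====
-- def czy_mniejszy(n, s, k1, k2):
--     if k1 < n and k2 < n:
--         m = min(n - k1, n - k2)
--         return s[k1:k1 + m] <= s[k2:k2 + m]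
--     return k2 <= n
-- ===== Notes on version B (the rewrite author's own statement) =====
-- stated objective: idiomatic
-- what changed: Replaced A's hand-written character-by-character while loop by one comparison of two equal-length slices (Python's built-in lexicographic <=), with A's own no-iteration fallback k2 <= n.
-- outside the precondition, e.g. on czy_mniejszy(2, 'ab', -1, 0): A returns False, B returns True; on czy_mniejszy(3, 'ba', 0, 1): A returns False, B returns False
import Mathlib
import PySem

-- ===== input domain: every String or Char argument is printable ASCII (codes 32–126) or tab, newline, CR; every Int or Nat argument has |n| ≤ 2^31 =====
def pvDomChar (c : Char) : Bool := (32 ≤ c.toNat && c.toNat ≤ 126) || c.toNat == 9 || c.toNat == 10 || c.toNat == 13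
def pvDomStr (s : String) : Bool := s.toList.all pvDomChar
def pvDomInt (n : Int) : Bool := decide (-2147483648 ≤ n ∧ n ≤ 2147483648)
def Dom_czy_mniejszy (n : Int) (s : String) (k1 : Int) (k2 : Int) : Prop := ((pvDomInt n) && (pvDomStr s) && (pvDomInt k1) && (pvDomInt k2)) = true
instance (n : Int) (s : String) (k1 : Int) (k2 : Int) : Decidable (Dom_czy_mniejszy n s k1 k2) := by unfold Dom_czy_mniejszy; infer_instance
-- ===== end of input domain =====

-- B replaces A's character-by-character while loop by a single built-in lexicographic
-- comparison of two equal-length slices (idiomatic).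


-- ===== PORT A =====
-- the while loop of A; `none` from pyGet? is Python's IndexError (excluded by Pre_; the port returns false there)
def czyLoop (n : Int) (s : List Char) (i j : Int) : Bool :=
  if _h : i < n ∧ j < n then
    match PySem.List.pyGet? s i, PySem.List.pyGet? s j with
    | some ci, some cj =>
      if ci = cj then czyLoop n s (i + 1) (j + 1)
      else if ci < cj then true else false
    | _, _ => false
  else if j ≤ n then true else false
termination_by (n - i).toNat
decreasing_by omega

def czy_mniejszy (n : Int) (s : String) (k1 : Int) (k2 : Int) : Bool :=
  czyLoop n s.toList k1 k2

-- ===== PORT B =====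
-- Python's built-in str <= (code-point lexicographic), exact on all strings
def strLeB : List Char → List Char → Bool
  | [], _ => true
  | _ :: _, [] => false
  | a :: as, b :: bs => if a = b then strLeB as bs else decide (a < b)

def czy_mniejszy_alt (n : Int) (s : String) (k1 : Int) (k2 : Int) : Bool :=
  if k1 < n ∧ k2 < n then
    strLeB (PySem.List.slice s.toList (some k1) (some (k1 + min (n - k1) (n - k2))))
           (PySem.List.slice s.toList (some k2) (some (k2 + min (n - k1) (n - k2))))
  else decide (k2 ≤ n)

-- ===== PRECONDITION & SPEC =====
-- Pre_ excludes inputs on which the loop of A actually indexes s with a negative start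
-- (Python's negative-index wraparound, a corner no caller of a suffix comparison specifies)
-- or with n > len(s) (A raises IndexError unless a mismatch happens to come first).
def Pre_czy_mniejszy (n : Int) (s : String) (k1 : Int) (k2 : Int) : Prop :=
  (n ≤ k1 ∨ n ≤ k2) ∨ (0 ≤ k1 ∧ 0 ≤ k2 ∧ n ≤ (s.toList.length : Int))
instance (n : Int) (s : String) (k1 : Int) (k2 : Int) : Decidable (Pre_czy_mniejszy n s k1 k2) := by unfold Pre_czy_mniejszy; infer_instance

def pvWitness_czy_mniejszy : Int × String × Int × Int := (2, "ab", 0, 1)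

def Spec_czy_mniejszy (n : Int) (s : String) (k1 : Int) (k2 : Int) (out : Bool) : Prop := out = czy_mniejszy_alt n s k1 k2
instance (n : Int) (s : String) (k1 : Int) (k2 : Int) (out : Bool) : Decidable (Spec_czy_mniejszy n s k1 k2 out) := by unfold Spec_czy_mniejszy; infer_instance

-- ===== CLAIM (what is proved, stated in full; the proofs are below) =====
def Claim_equal_czy_mniejszy : Prop := ∀ (n : Int) (s : String) (k1 : Int) (k2 : Int), Dom_czy_mniejszy n s k1 k2 → Pre_czy_mniejszy n s k1 k2 → Spec_czy_mniejszy n s k1 k2 (czy_mniejszy n s k1 k2)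

-- ===== LEMMAS AND PROOFS =====

lemma czyLoop_eq_strLeB (s : List Char) (n : Int) (hn : n ≤ (s.length : Int)) :
    ∀ (fuel : Nat) (i j : Int), (n - i).toNat ≤ fuel → 0 ≤ i → 0 ≤ j → i ≤ n → j ≤ n →
      czyLoop n s i j =
        strLeB ((s.drop i.toNat).take (min (n - i) (n - j)).toNat)
               ((s.drop j.toNat).take (min (n - i) (n - j)).toNat) := by
  intro fuel
  induction fuel with
  | zero =>
    intro i j hf h0i h0j hin hjn
    have hi : ¬ (i < n ∧ j < n) := by omega
    have hm : (min (n - i) (n - j)).toNat = 0 := by omega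
    rw [czyLoop, dif_neg hi, hm]
    simp [strLeB, hjn]
  | succ f ih =>
    intro i j hf h0i h0j hin hjn
    by_cases h : i < n ∧ j < n
    · obtain ⟨hi, hj⟩ := h
      have hiL : i.toNat < s.length := by omega
      have hjL : j.toNat < s.length := by omega
      have hgi : PySem.List.pyGet? s i = some s[i.toNat] := by
        have e : i = ((i.toNat : Nat) : Int) := by omega
        conv_lhs => rw [e]
        rw [PySem.List.pyGet?_natCast]
        exact List.getElem?_eq_getElem hiL
      have hgj : PySem.List.pyGet? s j = some s[j.toNat] := by
        have e : j = ((j.toNat : Nat) : Int) := by omega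
        conv_lhs => rw [e]
        rw [PySem.List.pyGet?_natCast]
        exact List.getElem?_eq_getElem hjL
      have hm1 : (min (n - i) (n - j)).toNat = (min (n - (i+1)) (n - (j+1))).toNat + 1 := by omega
      have hdi : s.drop i.toNat = s[i.toNat] :: s.drop (i.toNat + 1) :=
        List.drop_eq_getElem_cons hiL
      have hdj : s.drop j.toNat = s[j.toNat] :: s.drop (j.toNat + 1) :=
        List.drop_eq_getElem_cons hjL
      have hi1 : (i + 1).toNat = i.toNat + 1 := by omega
      have hj1 : (j + 1).toNat = j.toNat + 1 := by omega
      rw [czyLoop, dif_pos ⟨hi, hj⟩, hgi, hgj, hdi, hdj, hm1, List.take_succ_cons,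
        List.take_succ_cons]
      have hred : (match some s[i.toNat], some s[j.toNat] with
          | some ci, some cj => if ci = cj then czyLoop n s (i + 1) (j + 1)
                                else if ci < cj then true else false
          | _, _ => false)
          = if s[i.toNat] = s[j.toNat] then czyLoop n s (i + 1) (j + 1)
            else if s[i.toNat] < s[j.toNat] then true else false := rfl
      rw [hred]
      by_cases hc : s[i.toNat] = s[j.toNat]
      · rw [if_pos hc]
        rw [ih (i+1) (j+1) (by omega) (by omega) (by omega) (by omega) (by omega)]
        simp [strLeB, hc, hi1, hj1]
      · rw [if_neg hc]
        simp [strLeB, hc]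
    · rw [czyLoop, dif_neg h]
      have hm : (min (n - i) (n - j)).toNat = 0 := by omega
      simp [hm, strLeB, hjn]

-- ===== VERDICT (by name: the statement is the Claim_ definition above) =====
theorem czy_mniejszy_spec : Claim_equal_czy_mniejszy := by
  intro n s k1 k2 _hdom hpre
  unfold Spec_czy_mniejszy czy_mniejszy czy_mniejszy_alt
  by_cases h : k1 < n ∧ k2 < n
  · obtain ⟨hk1, hk2⟩ := h
    have hpre' : 0 ≤ k1 ∧ 0 ≤ k2 ∧ n ≤ (s.toList.length : Int) := by
      rcases hpre with h' | h'
      · omega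
      · exact h'
    obtain ⟨h01, h02, hlen⟩ := hpre'
    have hm : 0 ≤ min (n - k1) (n - k2) := by omega
    rw [if_pos ⟨hk1, hk2⟩]
    rw [PySem.List.slice_toNat _ h01 (by omega), PySem.List.slice_toNat _ h02 (by omega)]
    have e1 : (k1 + min (n - k1) (n - k2)).toNat - k1.toNat = (min (n - k1) (n - k2)).toNat := by omega
    have e2 : (k2 + min (n - k1) (n - k2)).toNat - k2.toNat = (min (n - k1) (n - k2)).toNat := by omega
    rw [e1, e2]
    exact czyLoop_eq_strLeB s.toList n hlen (n - k1).toNat k1 k2 (le_refl _) h01 h02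
      (by omega) (by omega)
  · rw [czyLoop, dif_neg h, if_neg h]
    by_cases hj : k2 ≤ n <;> simp [hj]
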